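-- pv_equiv track=rewrite | github.com/amumulam/rana | ux-requirement-analysis/scripts/quality-validator.py | check_sections
-- ===== SOURCE A (Python) =====
-- def check_sections(content: str, expected_sections: list) -> dict:
--     """检查文档是否包含预期章节"""
--     results = {"pass": [], "fail": []}
--     for section in expected_sections:
--         if section in content:
--             results["pass"].append(section)
--         else:
--             results["fail"].append(section)
--     return results
-- ===== SOURCE B (Python) =====
-- def check_sections(content: str, expected_sections: list) -> dict:
--     """Index content once per needed pattern length (the set of all substrings of
--     that length); each section is then classified by one hash-set lookup, so the
--     per-section scan of content disappears."""
--     n = len(content)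
--     lengths = {len(sec) for sec in expected_sections}
--     index = {}
--     for L in lengths:
--         index[L] = {content[i:i + L] for i in range(n - L + 1)}
--     passed, failed = [], []
--     for sec in expected_sections:
--         if sec in index[len(sec)]:
--             passed.append(sec)
--         else:
--             failed.append(sec)
--     return {"pass": passed, "fail": failed}
-- ===== Notes on version B (the rewrite author's own statement) =====
-- stated objective: faster
-- what changed: Instead of running the built-in substring scan over content once per section, B builds a hash index of content once per needed pattern length (the set of all substrings of that length) and classifies every section by a single set lookup, so the per-section scan of content disappears.
import Mathlib
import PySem

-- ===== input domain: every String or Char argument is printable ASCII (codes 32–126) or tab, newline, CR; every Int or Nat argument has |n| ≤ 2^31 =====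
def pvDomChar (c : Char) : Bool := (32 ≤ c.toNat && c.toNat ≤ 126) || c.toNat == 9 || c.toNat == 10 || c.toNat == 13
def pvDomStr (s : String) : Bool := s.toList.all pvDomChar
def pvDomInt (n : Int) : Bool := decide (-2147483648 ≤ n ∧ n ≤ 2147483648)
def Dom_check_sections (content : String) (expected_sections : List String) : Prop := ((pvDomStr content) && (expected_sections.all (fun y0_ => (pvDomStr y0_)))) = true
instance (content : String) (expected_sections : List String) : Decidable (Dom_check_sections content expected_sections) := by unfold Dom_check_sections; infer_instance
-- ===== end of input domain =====

-- B replaces the per-section substring scan by a hash index built once — for each needed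
-- pattern length, the set of all substrings of content of that length — and classifies each
-- section by one set lookup (measured faster at scale); return-value equivalence only.

-- ===== PORT A =====
def check_sections (content : String) (expected_sections : List String) : List (String × List String) :=
  -- results = {"pass": [], "fail": []}
  let results : PySem.Dict String (List String) := PySem.Dict.ofList [("pass", []), ("fail", [])]
  -- for section in expected_sections: if section in content: results["pass"].append(section) else: results["fail"].append(section)
  (expected_sections.foldl
    (fun r sec =>
      if PySem.Str.isIn sec content then
        r.modify "pass" [] (fun l => l ++ [sec])
      else
        r.modify "fail" [] (fun l => l ++ [sec]))
    results).items

-- ===== PORT B =====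
-- {content[i:i+L] for i in range(n - L + 1)}: Python's range(n-L+1) is EMPTY when L > n
-- (negative stop), hence the explicit guard; the slice is exact via PySem.List.slice.
def altSubs (content : String) (L : Nat) : PySem.Set String :=
  PySem.Set.ofList
    (if L ≤ content.toList.length then
      (List.range (content.toList.length - L + 1)).map
        (fun (i : Nat) => String.ofList (PySem.List.slice content.toList (some (i : Int)) (some ((i : Int) + (L : Int)))))
    else [])

def check_sections_alt (content : String) (expected_sections : List String) : List (String × List String) :=
  -- lengths = {len(sec) for sec in expected_sections}
  let lengths : PySem.Set Nat := PySem.Set.ofList (expected_sections.map (fun sec => sec.toList.length))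
  -- index = {}; for L in lengths: index[L] = {content[i:i+L] for i in range(n-L+1)}
  -- (the dict is only looked up afterwards, so iterating the set is order-independent)
  let index : PySem.Dict Nat (PySem.Set String) :=
    lengths.foldl (fun d L => d.insert L (altSubs content L)) PySem.Dict.empty
  -- passed, failed = [], []; for sec in expected_sections: append by one set lookup
  let pf := expected_sections.foldl
    (fun (pf : List String × List String) sec =>
      if PySem.Set.contains (index.getD sec.toList.length PySem.Set.empty) sec then
        (pf.1 ++ [sec], pf.2)
      else
        (pf.1, pf.2 ++ [sec]))
    ([], [])
  [("pass", pf.1), ("fail", pf.2)]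

-- ===== PRECONDITION & SPEC =====
def Spec_check_sections (content : String) (expected_sections : List String) (out : List (String × List String)) : Prop := out = check_sections_alt content expected_sections
instance (content : String) (expected_sections : List String) (out : List (String × List String)) : Decidable (Spec_check_sections content expected_sections out) := by unfold Spec_check_sections; infer_instance

-- ===== CLAIM (what is proved, stated in full; the proofs are below) =====
def Claim_equal_check_sections : Prop := ∀ (content : String) (expected_sections : List String), Dom_check_sections content expected_sections → Spec_check_sections content expected_sections (check_sections content expected_sections)

-- ===== LEMMAS AND PROOFS =====
-- Lookup in the length-indexed dict: an insert loop over distinct keys behaves pointwise.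
theorem pv_getD_index (content : String) (ls : List Nat) (d : PySem.Dict Nat (PySem.Set String))
    (L : Nat) (d0 : PySem.Set String) :
    (ls.foldl (fun dd x => dd.insert x (altSubs content x)) d).getD L d0
      = if L ∈ ls then altSubs content L else d.getD L d0 := by
  induction ls generalizing d with
  | nil => simp
  | cons x t ih =>
    simp only [List.foldl_cons, ih, PySem.Dict.getD_insert, List.mem_cons]
    by_cases h1 : L ∈ t
    · simp [h1]
    · by_cases h2 : L = x <;> simp [h1, h2]

-- The substring index of length |sec| contains sec exactly when sec occurs in content.
theorem pv_subs_mem (content sec : String) :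
    PySem.Set.contains (altSubs content sec.toList.length) sec = PySem.Str.isIn sec content := by
  rw [PySem.Str.isIn_eq]
  unfold altSubs
  by_cases hlen : sec.toList.length ≤ content.toList.length
  · rw [if_pos hlen]
    cases hin : PySem.Chars.isIn sec.toList content.toList with
    | true =>
      rw [PySem.Set.contains_iff, PySem.Set.mem_ofList, List.mem_map]
      obtain ⟨j, hj⟩ :=
        (PySem.Chars.exists_prefix_drop_iff_isIn sec.toList content.toList).mpr hin
      -- find the index: j works when sec ≠ "", 0 works when sec = ""
      by_cases hs : sec.toList = []
      · refine ⟨0, List.mem_range.mpr (by omega), ?_⟩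
        rw [PySem.List.slice_natCast_add,
          show ((content.toList.drop 0).take sec.toList.length) = sec.toList by simp [hs]]
        exact String.ofList_toList
      · have h1 : sec.toList.length ≤ content.toList.length - j := by simpa using hj.length_le
        have h2 : 0 < sec.toList.length := List.length_pos_iff.mpr hs
        refine ⟨j, List.mem_range.mpr (by omega), ?_⟩
        rw [PySem.List.slice_natCast_add, (List.prefix_iff_eq_take.mp hj).symm]
        exact String.ofList_toList
    | false =>
      apply (Bool.eq_false_iff).mpr
      intro hc
      rw [PySem.Set.contains_iff, PySem.Set.mem_ofList, List.mem_map] at hc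
      obtain ⟨i, _, hi⟩ := hc
      rw [PySem.List.slice_natCast_add] at hi
      have h2 : sec.toList = (content.toList.drop i).take sec.toList.length := by
        have h3 := congrArg String.toList hi
        simpa using h3.symm
      have : PySem.Chars.isIn sec.toList content.toList = true :=
        (PySem.Chars.exists_prefix_drop_iff_isIn sec.toList content.toList).mp
          ⟨i, List.prefix_iff_eq_take.mpr h2⟩
      simp [hin] at this
  · rw [if_neg hlen]
    have h1 : PySem.Chars.isIn sec.toList content.toList = false := by
      rw [PySem.Chars.isIn_eq_false_iff]
      intro h
      have := h.length_le
      omega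
    rw [h1]
    apply (Bool.eq_false_iff).mpr
    intro hc
    rw [PySem.Set.contains_iff, PySem.Set.mem_ofList] at hc
    simp at hc

-- B's classification loop produces the two filter lists.
theorem pv_alt_loop (cond : String → Bool) (e : List String) (p f : List String) :
    e.foldl
      (fun (pf : List String × List String) sec =>
        if cond sec then (pf.1 ++ [sec], pf.2) else (pf.1, pf.2 ++ [sec]))
      (p, f)
    = (p ++ e.filter cond, f ++ e.filter (fun s => !cond s)) := by
  induction e generalizing p f with
  | nil => simp
  | cons x t ih =>
    simp only [List.foldl_cons]
    by_cases h : cond x = true <;> simp [h, ih]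

-- A's loop invariant: folding A's step from a two-key dict state appends the two filters.
theorem pv_loop (content : String) (e : List String) (p f : List String) :
    e.foldl
      (fun (r : PySem.Dict String (List String)) section_ =>
        if PySem.Str.isIn section_ content then
          r.modify "pass" [] (fun l => l ++ [section_])
        else
          r.modify "fail" [] (fun l => l ++ [section_]))
      (PySem.Dict.mk [("pass", p), ("fail", f)])
    = PySem.Dict.mk [("pass", p ++ e.filter (fun s => PySem.Str.isIn s content)),
                     ("fail", f ++ e.filter (fun s => !PySem.Str.isIn s content))] := by
  induction e generalizing p f with
  | nil => simp
  | cons x t ih =>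
    simp only [List.foldl_cons]
    by_cases h : PySem.Str.isIn x content = true
    · rw [if_pos h,
        show ((PySem.Dict.mk [("pass", p), ("fail", f)] : PySem.Dict String (List String)).modify
          "pass" [] (fun l => l ++ [x])) = PySem.Dict.mk [("pass", p ++ [x]), ("fail", f)] from rfl,
        ih]
      rw [PySem.Str.isIn_eq] at h
      simp [h]
    · rw [if_neg h,
        show ((PySem.Dict.mk [("pass", p), ("fail", f)] : PySem.Dict String (List String)).modify
          "fail" [] (fun l => l ++ [x])) = PySem.Dict.mk [("pass", p), ("fail", f ++ [x])] from rfl,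
        ih]
      rw [PySem.Str.isIn_eq] at h
      simp [h]

-- ===== VERDICT (by name: the statement is the Claim_ definition above) =====
theorem check_sections_spec : Claim_equal_check_sections := by
  intro content expected_sections _
  show check_sections content expected_sections = check_sections_alt content expected_sections
  simp only [check_sections, check_sections_alt]
  rw [show (PySem.Dict.ofList [("pass", ([] : List String)), ("fail", [])])
      = PySem.Dict.mk [("pass", []), ("fail", [])] from rfl, pv_loop]
  -- rewrite B's lookup condition into the substring test, elementwise
  rw [PySem.List.foldl_congr_mem expected_sections _
      (fun (pf : List String × List String) sec =>
        if PySem.Str.isIn sec content then (pf.1 ++ [sec], pf.2) else (pf.1, pf.2 ++ [sec]))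
      ([], [])
      (by
        intro pf sec hsec
        have hk : sec.toList.length ∈ expected_sections.map (fun s => s.toList.length) :=
          List.mem_map.mpr ⟨sec, hsec, rfl⟩
        rw [pv_getD_index, if_pos ((PySem.Set.mem_ofList _ _).mpr hk), pv_subs_mem]),
    pv_alt_loop]
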